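-- pv_equiv track=rewrite | github.com/DaSeipel/bettingsim | scripts/find_missing_games.py | _team_core_name
-- ===== SOURCE A (Python) =====
-- def _normalize_team(s: str) -> str:
--     """Lowercase, strip, collapse spaces."""
--     if not s or not isinstance(s, str):
--         return ""
--     return " ".join(s.lower().strip().split())
--
-- def _team_core_name(s: str) -> str:
--     """Core name for matching: drop common suffixes like 'Cyclones', 'Wildcats', 'Volunteers'."""
--     n = _normalize_team(s)
--     # Remove trailing " Mascot" (e.g. "Tennessee Volunteers" -> "tennessee")
--     for suffix in (
--         " cyclones", " wildcats", " volunteers", " commodores", " bulldogs", " tigers", " crimson tide",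
--         " tar heels", " blue devils", " jayhawks", " cardinals", " hurricanes", " seminoles",
--         " gators", " gamecocks", " razorbacks", " rebels", " bulldogs", " aggies", " horned frogs",
--         " sooners", " longhorns", " red raiders", " cougars", " bearcats", " mountaineers",
--         " buckeyes", " wolverines", " spartans", " hoosiers", " boilermakers", " fighting illini",
--         " hawkeyes", " sun devils", " bruins", " trojans", " huskies", " shockers", " panthers",
--         " orange", " demon deacons", " eagles", " ramblers", " revolutionaries", " sharks",
--         " seahawks", " catamounts", " big green", " big red", " crimson",
--     ):
--         if n.endswith(suffix):
--             n = n[: -len(suffix)].strip()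
--             break
--     return n
-- ===== SOURCE B (Python) =====
-- _SINGLE = {
--     "cyclones", "wildcats", "volunteers", "commodores", "bulldogs", "tigers",
--     "jayhawks", "cardinals", "hurricanes", "seminoles", "gators", "gamecocks",
--     "razorbacks", "rebels", "aggies", "sooners", "longhorns", "cougars",
--     "bearcats", "mountaineers", "buckeyes", "wolverines", "spartans",
--     "hoosiers", "boilermakers", "hawkeyes", "bruins", "trojans", "huskies",
--     "shockers", "panthers", "orange", "eagles", "ramblers", "revolutionaries",
--     "sharks", "seahawks", "catamounts", "crimson",
-- }
--
-- _DOUBLE = {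
--     "crimson tide", "tar heels", "blue devils", "horned frogs", "red raiders",
--     "fighting illini", "sun devils", "demon deacons", "big green", "big red",
-- }
--
-- def _team_core_name(s: str) -> str:
--     """Core name for matching: drop a trailing mascot word (or two-word mascot)."""
--     w = s.lower().strip().split() if isinstance(s, str) else []
--     if len(w) >= 3 and " ".join(w[-2:]) in _DOUBLE:
--         w = w[:-2]
--     elif len(w) >= 2 and w[-1] in _SINGLE:
--         w = w[:-1]
--     return " ".join(w)
-- ===== Notes on version B (the rewrite author's own statement) =====
-- stated objective: simpler
-- what changed: Replaces the 50-iteration endswith/slice/strip suffix scan with a split-into-words pass that checks the last one or two words against two mascot sets and drops them by list slicing.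
import Mathlib
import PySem

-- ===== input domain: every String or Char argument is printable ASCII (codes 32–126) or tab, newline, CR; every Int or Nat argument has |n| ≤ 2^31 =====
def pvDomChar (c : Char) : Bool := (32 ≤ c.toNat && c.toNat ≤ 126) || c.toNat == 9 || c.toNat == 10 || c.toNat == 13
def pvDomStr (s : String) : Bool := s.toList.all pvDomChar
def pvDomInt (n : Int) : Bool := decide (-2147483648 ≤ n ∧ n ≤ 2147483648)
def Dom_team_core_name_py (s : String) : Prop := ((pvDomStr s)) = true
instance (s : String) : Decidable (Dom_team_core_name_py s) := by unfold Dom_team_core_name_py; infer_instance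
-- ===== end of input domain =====

-- B replaces A's 50-iteration endswith/slice/strip suffix scan by splitting the normalized
-- name into words and checking its last one/two words against two mascot sets (objective: simpler).

-- ===== PORT A =====
def pvNormalizeTeam (s : String) : String :=
  if s = "" then ""
  else PySem.Str.join " " (PySem.Str.split₀ (PySem.Str.strip (PySem.Str.lower s)))

def pvSuffixesA : List String := [" cyclones", " wildcats", " volunteers", " commodores", " bulldogs", " tigers", " crimson tide", " tar heels", " blue devils", " jayhawks", " cardinals", " hurricanes", " seminoles", " gators", " gamecocks", " razorbacks", " rebels", " bulldogs", " aggies", " horned frogs", " sooners", " longhorns", " red raiders", " cougars", " bearcats", " mountaineers", " buckeyes", " wolverines", " spartans", " hoosiers", " boilermakers", " fighting illini", " hawkeyes", " sun devils", " bruins", " trojans", " huskies", " shockers", " panthers", " orange", " demon deacons", " eagles", " ramblers", " revolutionaries", " sharks", " seahawks", " catamounts", " big green", " big red", " crimson"]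

def pvLoopA (n : String) : List String → String
  | [] => n
  | suf :: rest =>
      if PySem.Str.endswith n suf then
        PySem.Str.strip (PySem.Str.slice n none (some (-(PySem.Str.len suf))))
      else pvLoopA n rest

def team_core_name_py (s : String) : String :=
  pvLoopA (pvNormalizeTeam s) pvSuffixesA

-- ===== PORT B =====
def pvSingles : List String := ["cyclones", "wildcats", "volunteers", "commodores", "bulldogs", "tigers", "jayhawks", "cardinals", "hurricanes", "seminoles", "gators", "gamecocks", "razorbacks", "rebels", "aggies", "sooners", "longhorns", "cougars", "bearcats", "mountaineers", "buckeyes", "wolverines", "spartans", "hoosiers", "boilermakers", "hawkeyes", "bruins", "trojans", "huskies", "shockers", "panthers", "orange", "eagles", "ramblers", "revolutionaries", "sharks", "seahawks", "catamounts", "crimson"]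

def pvDoubles : List String := ["crimson tide", "tar heels", "blue devils", "horned frogs", "red raiders", "fighting illini", "sun devils", "demon deacons", "big green", "big red"]

def team_core_name_py_alt (s : String) : String :=
  let w := PySem.Str.split₀ (PySem.Str.strip (PySem.Str.lower s))
  PySem.Str.join " "
    (if 3 ≤ w.length ∧ PySem.Str.join " " (PySem.List.slice w (some (-2)) none) ∈ pvDoubles then
      PySem.List.slice w none (some (-2))
     else if 2 ≤ w.length ∧ w.getLastD "" ∈ pvSingles then
      PySem.List.slice w none (some (-1))
     else w)

-- ===== PRECONDITION & SPEC =====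
def Spec_team_core_name_py (s : String) (out : String) : Prop := out = team_core_name_py_alt s
instance (s : String) (out : String) : Decidable (Spec_team_core_name_py s out) := by unfold Spec_team_core_name_py; infer_instance

-- ===== CLAIM (what is proved, stated in full; the proofs are below) =====
def Claim_equal_team_core_name_py : Prop := ∀ (s : String), Dom_team_core_name_py s → Spec_team_core_name_py s (team_core_name_py s)

-- ===== LEMMAS AND PROOFS =====

def pvGoodW (w : List Char) : Prop := w ≠ [] ∧ ∀ c ∈ w, PySem.Chars.isspace c = false

theorem go_good : ∀ (s cur : List Char) (acc : List (List Char)),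
    (∀ c ∈ cur, PySem.Chars.isspace c = false) → (∀ w ∈ acc, pvGoodW w) →
    ∀ w ∈ PySem.Chars.split₀.go s cur acc, pvGoodW w := by
  intro s
  induction s with
  | nil =>
    intro cur acc hcur hacc w hw
    simp only [PySem.Chars.split₀.go] at hw
    by_cases hc : cur.isEmpty
    · simp [hc] at hw; exact hacc w hw
    · simp [hc] at hw
      rcases hw with h | h
      · exact hacc w h
      · subst h
        refine ⟨by simpa [List.isEmpty_iff] using hc, ?_⟩
        intro c hcm; exact hcur c (List.mem_reverse.mp hcm)
  | cons c rest ih =>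
    intro cur acc hcur hacc w hw
    simp only [PySem.Chars.split₀.go] at hw
    by_cases hsp : PySem.Chars.isspace c
    · by_cases hc : cur.isEmpty
      · simp [hsp, hc] at hw
        exact ih [] acc (by simp) hacc w hw
      · simp [hsp, hc] at hw
        refine ih [] _ (by simp) ?_ w hw
        intro u hu
        rcases List.mem_cons.mp hu with h | h
        · subst h
          exact ⟨by simpa [List.isEmpty_iff] using hc, fun d hd => hcur d (List.mem_reverse.mp hd)⟩
        · exact hacc u h
    · simp [hsp] at hw
      refine ih (c :: cur) acc ?_ hacc w hw
      intro d hd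
      rcases List.mem_cons.mp hd with h | h
      · subst h; simpa using hsp
      · exact hcur d h

theorem pv_split_good' (s : List Char) : ∀ w ∈ PySem.Chars.split₀ s, pvGoodW w :=
  go_good s [] [] (by simp) (by simp)

theorem go_word : ∀ (w rest cur : List Char) (acc : List (List Char)),
    (∀ c ∈ w, PySem.Chars.isspace c = false) →
    PySem.Chars.split₀.go (w ++ rest) cur acc = PySem.Chars.split₀.go rest (w.reverse ++ cur) acc := by
  intro w
  induction w with
  | nil => intro rest cur acc h; simp
  | cons c t ih =>
    intro rest cur acc h
    have hc : PySem.Chars.isspace c = false := h c (by simp)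
    simp only [List.cons_append, PySem.Chars.split₀.go, hc]
    rw [ih rest (c :: cur) acc (fun d hd => h d (by simp [hd]))]
    simp

def pvJsp (ws : List (List Char)) : List Char := PySem.Chars.join [' '] ws
def pvGoodL (ws : List (List Char)) : Prop := ∀ w ∈ ws, pvGoodW w

theorem jsp_cons (w : List Char) (ws : List (List Char)) :
    pvJsp (w :: ws) = w ++ (if ws = [] then [] else ' ' :: pvJsp ws) := by
  cases ws with
  | nil => simp [pvJsp, PySem.Chars.join_singleton]
  | cons v vs => simp [pvJsp, PySem.Chars.join_cons_cons]

theorem pv_jsp_append' (pre vs : List (List Char)) (hp : pre ≠ []) (hv : vs ≠ []) :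
    pvJsp (pre ++ vs) = pvJsp pre ++ ' ' :: pvJsp vs := by
  induction pre with
  | nil => simp at hp
  | cons w ws ih =>
    by_cases hws : ws = []
    · subst hws
      simp [jsp_cons, hv]
    · rw [List.cons_append, jsp_cons, jsp_cons w ws, if_neg hws,
        if_neg (by simp [hws] : ¬ (ws ++ vs = [])), ih hws]
      simp

theorem go_jsp : ∀ (ws : List (List Char)), pvGoodL ws → ∀ acc,
    PySem.Chars.split₀.go (pvJsp ws) [] acc = acc.reverse ++ ws := by
  intro ws
  induction ws with
  | nil => intro h acc; simp [pvJsp, PySem.Chars.join_nil, PySem.Chars.split₀.go]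
  | cons w ws ih =>
    intro h acc
    have hw := h w (by simp)
    rw [jsp_cons, go_word w _ [] acc hw.2]
    by_cases hws : ws = []
    · subst hws
      simp [PySem.Chars.split₀.go, List.isEmpty_iff, hw.1]
    · rw [if_neg hws]
      simp only [PySem.Chars.split₀.go, show PySem.Chars.isspace ' ' = true from by decide,
        if_true]
      rw [if_neg (by simp [List.isEmpty_iff, hw.1])]
      rw [ih (fun u hu => h u (by simp [hu])) _]
      simp

theorem pv_split_jsp' (ws : List (List Char)) (h : pvGoodL ws) :
    PySem.Chars.split₀ (pvJsp ws) = ws := by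
  have := go_jsp ws h []
  simpa [PySem.Chars.split₀] using this

theorem pv_jsp_inj (ws vs : List (List Char)) (hw : pvGoodL ws) (hv : pvGoodL vs)
    (h : pvJsp ws = pvJsp vs) : ws = vs := by
  rw [← pv_split_jsp' ws hw, ← pv_split_jsp' vs hv, h]

theorem pv_ends_aux (vs : List (List Char)) (hvs : pvGoodL vs) :
    ∀ (ws : List (List Char)) (l : List Char), pvGoodL ws →
    pvJsp ws = l ++ ' ' :: pvJsp vs → ∃ pre, pre ≠ [] ∧ ws = pre ++ vs := by
  intro ws
  induction ws with
  | nil =>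
    intro l _ hl
    exfalso
    simp [pvJsp, PySem.Chars.join_nil] at hl
  | cons w ws ih =>
    intro l hg hl
    have hgw : pvGoodW w := hg w (by simp)
    have hgws : pvGoodL ws := fun u hu => hg u (by simp [hu])
    rw [jsp_cons] at hl
    by_cases hws : ws = []
    · subst hws
      exfalso
      simp at hl
      have : ' ' ∈ w := by rw [hl]; simp
      have := hgw.2 ' ' this
      simp [PySem.Chars.isspace] at this
    · rw [if_neg hws] at hl
      rcases List.append_eq_append_iff.mp hl with ⟨a', ha1, ha2⟩ | ⟨c', hc1, hc2⟩
      · cases a' with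
        | nil =>
          simp at ha2
          have : ws = vs := pv_jsp_inj _ _ hgws hvs ha2
          exact ⟨[w], by simp, by simp [this]⟩
        | cons c t =>
          simp at ha2
          obtain ⟨hc, ht⟩ := ha2
          obtain ⟨pre, hpre, hws'⟩ := ih t hgws ht
          exact ⟨w :: pre, by simp, by simp [hws']⟩
      · cases c' with
        | nil =>
          simp at hc2
          have : vs = ws := pv_jsp_inj _ _ hvs hgws hc2
          exact ⟨[w], by simp, by simp [this]⟩
        | cons c t =>
          exfalso
          simp at hc2
          have : ' ' ∈ w := by rw [hc1, hc2.1]; simp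
          have := hgw.2 ' ' this
          simp [PySem.Chars.isspace] at this

theorem pv_ends_iff' (ws vs : List (List Char)) (hws : pvGoodL ws) (hvs : pvGoodL vs)
    (hv : vs ≠ []) :
    (' ' :: pvJsp vs) <:+ pvJsp ws ↔ ∃ pre, pre ≠ [] ∧ ws = pre ++ vs := by
  constructor
  · rintro ⟨l, hl⟩
    exact pv_ends_aux vs hvs ws l hws hl.symm
  · rintro ⟨pre, hpre, rfl⟩
    rw [pv_jsp_append' pre vs hpre hv]
    exact ⟨pvJsp pre, rfl⟩

theorem pv_rstrip_eq_self (l : List Char)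
    (h : ∀ x, l.getLast? = some x → PySem.Chars.isspace x = false) :
    PySem.Chars.rstrip l = l := by
  rw [PySem.Chars.rstrip]
  rcases hrev : l.reverse with _ | ⟨x, t⟩
  · simp at hrev; simp [hrev]
  · have hx : l.getLast? = some x := by
      rw [← List.head?_reverse, hrev]; rfl
    rw [List.dropWhile_cons, h x hx]
    simp only [Bool.false_eq_true, if_false]
    rw [← hrev, List.reverse_reverse]

theorem pv_jsp_getLast (pre : List (List Char)) (h : pvGoodL pre) (hp : pre ≠ []) :
    ∀ x, (pvJsp pre).getLast? = some x → PySem.Chars.isspace x = false := by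
  rcases List.eq_nil_or_concat pre with hnil | ⟨ws, v, rfl⟩
  · exact absurd hnil hp
  · simp only [List.concat_eq_append] at h hp ⊢
    have hv : pvGoodW v := h v (by simp)
    have hjsp : ∃ pfx, pvJsp (ws ++ [v]) = pfx ++ v := by
      rcases List.eq_nil_or_concat ws with rfl | hne
      · exact ⟨[], by simp [jsp_cons]⟩
      · have : ws ≠ [] := by rcases hne with ⟨a, b, rfl⟩; simp
        rw [pv_jsp_append' ws [v] this (by simp), jsp_cons]
        exact ⟨pvJsp ws ++ [' '], by simp⟩
    obtain ⟨pfx, hpfx⟩ := hjsp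
    intro x hx
    rw [hpfx, List.getLast?_append_of_ne_nil _ hv.1] at hx
    exact hv.2 x (List.mem_of_getLast? hx)

theorem pv_strip_jsp' (pre : List (List Char)) (h : pvGoodL pre) (hp : pre ≠ []) :
    PySem.Chars.strip (pvJsp pre) = pvJsp pre := by
  obtain ⟨w, ws, rfl⟩ := List.exists_cons_of_ne_nil hp
  have hgw : pvGoodW w := h w (by simp)
  obtain ⟨c, w', rfl⟩ := List.exists_cons_of_ne_nil hgw.1
  have hc : PySem.Chars.isspace c = false := hgw.2 c (by simp)
  have hl : PySem.Chars.lstrip (pvJsp ((c :: w') :: ws)) = pvJsp ((c :: w') :: ws) := by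
    rw [jsp_cons]
    simp [PySem.Chars.lstrip, hc]
  rw [PySem.Chars.strip, hl, pv_rstrip_eq_self _ (pv_jsp_getLast _ h (by simp))]

theorem pv_loop_eq' (sufs : List String) (n : String) (W : List (List Char))
    (hW : pvGoodL W) (hn : n.toList = pvJsp W)
    (hs : ∀ t ∈ sufs, t.toList = ' ' :: pvJsp (PySem.Chars.split₀ t.toList) ∧
          PySem.Chars.split₀ t.toList ≠ []) :
    (pvLoopA n sufs).toList =
      match sufs.find? (fun t => PySem.Chars.endswith (pvJsp W) t.toList) with
      | some t => pvJsp (W.take (W.length - (PySem.Chars.split₀ t.toList).length))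
      | none => pvJsp W := by
  induction sufs with
  | nil => simp [pvLoopA, hn]
  | cons t rest ih =>
    obtain ⟨hwf, hne⟩ := hs t (by simp)
    have hvsg : pvGoodL (PySem.Chars.split₀ t.toList) := pv_split_good' _
    by_cases hend : PySem.Chars.endswith (pvJsp W) t.toList
    · have hend' : PySem.Str.endswith n t = true := by
        rw [PySem.Str.endswith_eq, hn]; exact hend
      simp only [pvLoopA, hend', if_true]
      rw [List.find?_cons_of_pos (by simpa using hend)]
      have hsuf : (' ' :: pvJsp (PySem.Chars.split₀ t.toList)) <:+ pvJsp W := by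
        have h2 := (PySem.Chars.endswith_iff _ _).mp hend
        rwa [hwf] at h2
      obtain ⟨pre, hpre, hWdec⟩ :=
        (pv_ends_iff' W _ hW hvsg hne).mp hsuf
      have hpreg : pvGoodL pre := fun u hu => hW u (by rw [hWdec]; exact List.mem_append_left _ hu)
      have htlen := congrArg List.length hwf
      simp only [List.length_cons] at htlen
      have hjspdec : pvJsp W = pvJsp pre ++ ' ' :: pvJsp (PySem.Chars.split₀ t.toList) := by
        rw [hWdec]; exact pv_jsp_append' _ _ hpre hne
      rw [PySem.Str.toList_strip, PySem.Str.toList_slice, PySem.Chars.slice_eq_listSlice, hn]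
      rw [PySem.Str.len_eq]
      rw [PySem.List.slice_to_neg_natCast _ _ (by omega)]
      have hslice : List.take ((pvJsp W).length - t.toList.length) (pvJsp W) = pvJsp pre := by
        rw [hjspdec]
        have hl2 : (pvJsp pre ++ ' ' :: pvJsp (PySem.Chars.split₀ t.toList)).length
            - t.toList.length = (pvJsp pre).length := by
          simp only [List.length_append, List.length_cons]; omega
        rw [hl2, List.take_left' rfl]
      rw [hslice, pv_strip_jsp' pre hpreg hpre]
      show pvJsp pre = pvJsp (List.take (W.length - (PySem.Chars.split₀ t.toList).length) W)
      have hlen2 : W.length - (PySem.Chars.split₀ t.toList).length = pre.length := by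
        rw [hWdec]; simp
      rw [hlen2, hWdec, List.take_left' rfl]
    · have hend' : ¬ PySem.Str.endswith n t = true := by
        rw [PySem.Str.endswith_eq, hn]; exact hend
      simp only [pvLoopA, hend']
      rw [List.find?_cons_of_neg (by simpa using hend)]
      exact ih (fun u hu => hs u (by simp [hu]))

def pvSgl : List (List Char) := pvSingles.map String.toList
def pvDbl : List (List Char) := pvDoubles.map String.toList

def pvAltChars (W : List (List Char)) : List Char :=
  if 3 ≤ W.length ∧ pvJsp (W.drop (W.length - 2)) ∈ pvDbl then pvJsp (W.take (W.length - 2))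
  else if 2 ≤ W.length ∧ W.getLastD [] ∈ pvSgl then pvJsp W.dropLast
  else pvJsp W

theorem pv_wf : ∀ t ∈ pvSuffixesA, t.toList = ' ' :: pvJsp (PySem.Chars.split₀ t.toList) ∧
    PySem.Chars.split₀ t.toList ≠ [] := by decide

theorem pv_cls : ∀ t ∈ pvSuffixesA,
    (∃ m ∈ pvSgl, PySem.Chars.split₀ t.toList = [m]) ∨
    (∃ d ∈ pvDbl, PySem.Chars.split₀ t.toList = PySem.Chars.split₀ d) := by decide

theorem pv_disj : ∀ d ∈ pvDbl, ∀ m ∈ pvSgl, (PySem.Chars.split₀ d).getLast? ≠ some m := by decide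

theorem pv_compl1 : ∀ m ∈ pvSgl, ∃ t ∈ pvSuffixesA, PySem.Chars.split₀ t.toList = [m] := by decide

theorem pv_compl2 : ∀ d ∈ pvDbl, ∃ t ∈ pvSuffixesA,
    PySem.Chars.split₀ t.toList = PySem.Chars.split₀ d := by decide

theorem pv_wfd : ∀ d ∈ pvDbl, d = pvJsp (PySem.Chars.split₀ d) ∧
    (PySem.Chars.split₀ d).length = 2 := by decide

theorem pv_match_dec (W : List (List Char)) (hW : pvGoodL W) (t : String)
    (ht : t ∈ pvSuffixesA) (hp : PySem.Chars.endswith (pvJsp W) t.toList = true) :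
    ∃ pre, pre ≠ [] ∧ W = pre ++ PySem.Chars.split₀ t.toList := by
  obtain ⟨hwf, hne⟩ := pv_wf t ht
  have hsuf := (PySem.Chars.endswith_iff _ _).mp hp
  rw [hwf] at hsuf
  exact (pv_ends_iff' W _ hW (pv_split_good' _) hne).mp hsuf

theorem pv_case1_of_double (W : List (List Char)) (pre' : List (List Char)) (d' : List Char)
    (hd' : d' ∈ pvDbl) (hpre' : pre' ≠ []) (hWdec' : W = pre' ++ PySem.Chars.split₀ d') :
    3 ≤ W.length ∧ pvJsp (W.drop (W.length - 2)) ∈ pvDbl := by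
  have hl2 : (PySem.Chars.split₀ d').length = 2 := (pv_wfd d' hd').2
  have hlen : W.length = pre'.length + 2 := by rw [hWdec']; simp [hl2]
  have hpl : pre'.length ≠ 0 := fun h0 => hpre' (List.length_eq_zero_iff.mp h0)
  constructor
  · omega
  · have hdrop : W.drop (W.length - 2) = PySem.Chars.split₀ d' := by
      rw [hWdec']
      have h3 : (pre' ++ PySem.Chars.split₀ d').length - 2 = pre'.length := by simp [hl2]
      rw [h3, List.drop_left]
    rw [hdrop, ← (pv_wfd d' hd').1]
    exact hd'

theorem pv_main' (W : List (List Char)) (hW : pvGoodL W) :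
    (match pvSuffixesA.find? (fun t => PySem.Chars.endswith (pvJsp W) t.toList) with
      | some t => pvJsp (W.take (W.length - (PySem.Chars.split₀ t.toList).length))
      | none => pvJsp W) = pvAltChars W := by
  by_cases h1 : 3 ≤ W.length ∧ pvJsp (W.drop (W.length - 2)) ∈ pvDbl
  · obtain ⟨hk, hd⟩ := h1
    have hlen2 : (W.drop (W.length - 2)).length = 2 := by simp; omega
    obtain ⟨x, y, hxy⟩ := List.length_eq_two.mp hlen2
    have hWdec : W = W.take (W.length - 2) ++ [x, y] := by rw [← hxy, List.take_append_drop]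
    have hpre : W.take (W.length - 2) ≠ [] := by
      intro h0
      have := congrArg List.length h0
      simp at this
      omega
    have hgood2 : pvGoodL [x, y] := by
      intro u hu
      exact hW u (by rw [hWdec]; exact List.mem_append_right _ hu)
    have hsplit_d : PySem.Chars.split₀ (pvJsp (W.drop (W.length - 2))) = [x, y] := by
      rw [hxy]; exact pv_split_jsp' _ hgood2
    obtain ⟨t₀, ht₀mem, ht₀⟩ := pv_compl2 _ hd
    have hp : PySem.Chars.endswith (pvJsp W) t₀.toList = true := by
      obtain ⟨hwf, hne⟩ := pv_wf t₀ ht₀mem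
      rw [PySem.Chars.endswith_iff, hwf, ht₀, hsplit_d]
      exact (pv_ends_iff' W [x, y] hW hgood2 (by simp)).mpr ⟨_, hpre, hWdec⟩
    obtain ⟨t, hteq⟩ := Option.isSome_iff_exists.mp
      ((List.find?_isSome (p := fun t => PySem.Chars.endswith (pvJsp W) t.toList)
        (xs := pvSuffixesA)).mpr ⟨t₀, ht₀mem, hp⟩)
    have htmem := List.mem_of_find?_eq_some hteq
    have htp := List.find?_some hteq
    obtain ⟨pre', hpre', hWdec'⟩ := pv_match_dec W hW t htmem htp
    have hlast : W.getLast? = some y := by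
      rw [hWdec, List.getLast?_append_of_ne_nil _ (by simp : ([x, y] : List (List Char)) ≠ [])]
      rfl
    have hwc : (PySem.Chars.split₀ t.toList).length = 2 := by
      rcases pv_cls t htmem with ⟨m, hm, hms⟩ | ⟨d', hd', hds⟩
      · exfalso
        have hmy : W.getLast? = some m := by
          rw [hWdec', hms, List.getLast?_append_of_ne_nil _ (by simp : ([m] : List (List Char)) ≠ [])]
          rfl
        have : m = y := by rw [hmy] at hlast; exact Option.some_inj.mp hlast
        subst this
        exact pv_disj _ hd m hm (by rw [hsplit_d]; rfl)
      · rw [hds]; exact (pv_wfd d' hd').2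
    rw [hteq]
    show pvJsp (W.take (W.length - (PySem.Chars.split₀ t.toList).length)) = pvAltChars W
    rw [hwc]
    unfold pvAltChars
    rw [if_pos ⟨hk, hd⟩]
  · by_cases h2 : 2 ≤ W.length ∧ W.getLastD [] ∈ pvSgl
    · obtain ⟨hk, hm⟩ := h2
      have hWne : W ≠ [] := by intro h0; rw [h0] at hk; simp at hk
      obtain ⟨ws, v, hWc⟩ := (List.eq_nil_or_concat W).resolve_left hWne
      simp only [List.concat_eq_append] at hWc
      have hlastv : W.getLastD [] = v := by rw [hWc]; simp
      rw [hlastv] at hm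
      have hWdec : W = W.dropLast ++ [v] := by rw [hWc]; simp
      have hgoodv : pvGoodW v := hW v (by rw [hWc]; exact List.mem_append_right _ (by simp))
      have hpreb : W.dropLast ≠ [] := by
        intro h0
        have h2' := congrArg List.length h0
        rw [List.length_dropLast] at h2'
        simp only [List.length_nil] at h2'
        omega
      obtain ⟨t₀, ht₀mem, ht₀⟩ := pv_compl1 _ hm
      have hp : PySem.Chars.endswith (pvJsp W) t₀.toList = true := by
        obtain ⟨hwf, hne⟩ := pv_wf t₀ ht₀mem
        rw [PySem.Chars.endswith_iff, hwf, ht₀]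
        refine (pv_ends_iff' W [v] hW ?_ (by simp)).mpr ⟨_, hpreb, hWdec⟩
        intro u hu
        simp at hu
        subst hu
        exact hgoodv
      obtain ⟨t, hteq⟩ := Option.isSome_iff_exists.mp
        ((List.find?_isSome (p := fun t => PySem.Chars.endswith (pvJsp W) t.toList)
          (xs := pvSuffixesA)).mpr ⟨t₀, ht₀mem, hp⟩)
      have htmem := List.mem_of_find?_eq_some hteq
      have htp : PySem.Chars.endswith (pvJsp W) t.toList = true := by
        simpa using List.find?_some hteq
      obtain ⟨pre', hpre', hWdec'⟩ := pv_match_dec W hW t htmem htp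
      have hwc : (PySem.Chars.split₀ t.toList).length = 1 := by
        rcases pv_cls t htmem with ⟨m', hm', hms⟩ | ⟨d', hd', hds⟩
        · rw [hms]; rfl
        · exact absurd (pv_case1_of_double W pre' d' hd' hpre' (by rw [hWdec', hds])) h1
      rw [hteq]
      show pvJsp (W.take (W.length - (PySem.Chars.split₀ t.toList).length)) = pvAltChars W
      rw [hwc]
      unfold pvAltChars
      rw [if_neg h1, if_pos ⟨hk, by rw [hlastv]; exact hm⟩, List.dropLast_eq_take]
    · have hnone : List.find? (fun t => PySem.Chars.endswith (pvJsp W) t.toList) pvSuffixesA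
          = none := by
        apply List.find?_eq_none.mpr
        intro t ht hp
        obtain ⟨pre', hpre', hWdec'⟩ := pv_match_dec W hW t ht (by simpa using hp)
        rcases pv_cls t ht with ⟨m, hm, hms⟩ | ⟨d', hd', hds⟩
        · apply h2
          rw [hWdec', hms]
          have hpl : pre'.length ≠ 0 := fun h0 => hpre' (List.length_eq_zero_iff.mp h0)
          refine ⟨by simp; omega, ?_⟩
          have hg : (pre' ++ [m]).getLastD [] = m := by simp
          rw [hg]
          exact hm
        · exact absurd (pv_case1_of_double W pre' d' hd' hpre' (by rw [hWdec', hds])) h1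
      rw [hnone]
      show pvJsp W = pvAltChars W
      unfold pvAltChars
      rw [if_neg h1, if_neg h2]

theorem pv_mem_toList (x : String) (L : List String) :
    x ∈ L ↔ x.toList ∈ L.map String.toList := by
  constructor
  · intro h; exact List.mem_map_of_mem h
  · intro h
    obtain ⟨y, hy, heq⟩ := List.mem_map.mp h
    rwa [← String.toList_inj.mp heq]

theorem pv_alt_toList' (s : String) :
    (team_core_name_py_alt s).toList =
      pvAltChars (PySem.Chars.split₀ (PySem.Chars.strip (PySem.Chars.lower s.toList))) := by
  unfold team_core_name_py_alt pvAltChars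
  dsimp only
  set w := PySem.Str.split₀ (PySem.Str.strip (PySem.Str.lower s)) with hw
  have hmap : w.map String.toList
      = PySem.Chars.split₀ (PySem.Chars.strip (PySem.Chars.lower s.toList)) := by
    rw [hw, PySem.Str.split₀_map_toList, PySem.Str.toList_strip, PySem.Str.toList_lower]
  set W := PySem.Chars.split₀ (PySem.Chars.strip (PySem.Chars.lower s.toList)) with hWdef
  have hlen : W.length = w.length := by rw [← hmap, List.length_map]
  -- condition 1
  have hc1 : (3 ≤ w.length ∧ PySem.Str.join " " (PySem.List.slice w (some (-2)) none) ∈ pvDoubles)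
      ↔ (3 ≤ W.length ∧ pvJsp (W.drop (W.length - 2)) ∈ pvDbl) := by
    rw [hlen]
    apply and_congr_right
    intro _
    rw [pv_mem_toList _ pvDoubles]
    rw [PySem.Str.toList_join, PySem.List.slice_from_neg_ofNat w 2 (by omega)]
    rw [show (" ".toList) = [' '] from rfl]
    rw [List.map_drop, hmap, ← hlen]
    rfl
  -- condition 2
  have hgl : W.getLastD [] = (w.getLastD "").toList := by
    rw [← hmap, List.getLastD_eq_getLast?, List.getLastD_eq_getLast?, List.getLast?_map]
    cases w.getLast? <;> rfl
  have hc2 : (2 ≤ w.length ∧ w.getLastD "" ∈ pvSingles)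
      ↔ (2 ≤ W.length ∧ W.getLastD [] ∈ pvSgl) := by
    rw [hlen, hgl]
    apply and_congr_right
    intro _
    exact pv_mem_toList _ pvSingles
  by_cases h1 : 3 ≤ w.length ∧ PySem.Str.join " " (PySem.List.slice w (some (-2)) none) ∈ pvDoubles
  · rw [if_pos h1, if_pos (hc1.mp h1)]
    rw [PySem.Str.toList_join, PySem.List.slice_to_neg_ofNat w 2 (by omega)]
    rw [show (" ".toList) = [' '] from rfl, List.map_take, hmap, ← hlen]
    rfl
  · rw [if_neg h1, if_neg (fun hh => h1 (hc1.mpr hh))]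
    by_cases h2 : 2 ≤ w.length ∧ w.getLastD "" ∈ pvSingles
    · rw [if_pos h2, if_pos (hc2.mp h2)]
      rw [PySem.Str.toList_join, PySem.List.slice_to_neg_one]
      rw [show (" ".toList) = [' '] from rfl, List.map_dropLast, hmap]
      rfl
    · rw [if_neg h2, if_neg (fun hh => h2 (hc2.mpr hh))]
      rw [PySem.Str.toList_join, show (" ".toList) = [' '] from rfl, hmap]
      rfl

-- ===== VERDICT (by name: the statement is the Claim_ definition above) =====
theorem team_core_name_py_spec : Claim_equal_team_core_name_py := by
  intro s _
  unfold Spec_team_core_name_py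
  by_cases hs : s = ""
  · subst hs; decide
  · apply String.toList_inj.mp
    rw [pv_alt_toList']
    set W := PySem.Chars.split₀ (PySem.Chars.strip (PySem.Chars.lower s.toList)) with hWdef
    have hW : pvGoodL W := pv_split_good' _
    have hn : (pvNormalizeTeam s).toList = pvJsp W := by
      unfold pvNormalizeTeam
      rw [if_neg hs, PySem.Str.toList_join]
      rw [PySem.Str.split₀_map_toList, PySem.Str.toList_strip, PySem.Str.toList_lower]
      rfl
    have hloop := pv_loop_eq' pvSuffixesA (pvNormalizeTeam s) W hW hn pv_wf
    unfold team_core_name_py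
    rw [hloop, pv_main' W hW]
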